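-- pv_equiv track=rewrite | github.com/kmedved/pbpstats | scripts/context_framework.py | _group_paths_for_index
-- ===== SOURCE A (Python) =====
-- from collections import defaultdict
-- from typing import Dict, Iterable, List, Optional, Sequence, Tuple
--
-- def _group_paths_for_index(paths: Sequence[str]) -> List[Tuple[str, List[str]]]:
--     groups: Dict[str, List[str]] = defaultdict(list)
--     for path in paths:
--         parts = path.split("/")
--         if len(parts) == 1:
--             group = "Root"
--         elif parts[0] == ".github":
--             group = ".github/workflows"
--         elif parts[0] == "pbpstats":
--             group = "/".join(parts[:2]) if len(parts) > 2 else "pbpstats"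
--         elif parts[0] == "tests":
--             group = "/".join(parts[:2]) if len(parts) > 2 else "tests"
--         elif parts[0] == "scripts":
--             group = "scripts"
--         else:
--             group = parts[0]
--         groups[group].append(path)
--     return sorted((group, sorted(values)) for group, values in groups.items())
-- ===== SOURCE B (Python) =====
-- def _group_key(path):
--     parts = path.split("/")
--     if len(parts) == 1:
--         return "Root"
--     if parts[0] == ".github":
--         return ".github/workflows"
--     if parts[0] == "pbpstats":
--         return "/".join(parts[:2]) if len(parts) > 2 else "pbpstats"
--     if parts[0] == "tests":
--         return "/".join(parts[:2]) if len(parts) > 2 else "tests"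
--     if parts[0] == "scripts":
--         return "scripts"
--     return parts[0]
--
--
-- def _group_paths_for_index(paths):
--     # sort-based grouping: one global sort of (group, path) pairs,
--     # then a single sequential scan that cuts the sorted list into runs
--     pairs = sorted((_group_key(p), p) for p in paths)
--     out = []
--     for key, value in pairs:
--         if out and out[-1][0] == key:
--             out[-1][1].append(value)
--         else:
--             out.append((key, [value]))
--     return out
-- ===== Notes on version B (the rewrite author's own statement) =====
-- stated objective: alternative
-- what changed: Replaces A's hash-map grouping (defaultdict accumulator, then a per-group sort of each value list plus a final sort of the groups) with sort-based grouping: one global sort of (group_key, path) pairs followed by a single sequential scan that cuts the sorted list into consecutive runs.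
import Mathlib
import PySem

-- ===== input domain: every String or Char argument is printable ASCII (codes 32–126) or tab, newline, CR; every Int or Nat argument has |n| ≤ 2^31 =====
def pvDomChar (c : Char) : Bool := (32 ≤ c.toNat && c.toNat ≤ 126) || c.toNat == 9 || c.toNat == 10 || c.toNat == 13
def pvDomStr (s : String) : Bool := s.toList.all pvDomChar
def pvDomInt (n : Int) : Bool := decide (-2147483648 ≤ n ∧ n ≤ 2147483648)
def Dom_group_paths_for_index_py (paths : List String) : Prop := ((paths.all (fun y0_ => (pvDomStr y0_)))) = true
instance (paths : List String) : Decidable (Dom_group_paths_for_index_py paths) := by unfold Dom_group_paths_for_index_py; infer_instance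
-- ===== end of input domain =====

-- B replaces A's hash-map accumulator (dict of groups, then per-group sorts plus a sort of the
-- groups) by one global sort of (group, path) pairs followed by a single sequential scan that
-- cuts the sorted list into runs (sort-based grouping); same cost class, different algorithm.

-- ===== PORT A =====
-- the group-key if/elif chain, identical in A (inline) and in B's helper _group_key
def pvGroupKey (path : String) : String :=
  let parts := (PySem.Str.split? path "/").getD []  -- split? = none only for an empty separator; "/" is nonempty
  let p0 := parts.headD ""                          -- parts[0]; str.split never yields [], so the default is unreachable
  if parts.length = 1 then "Root"
  else if p0 = ".github" then ".github/workflows"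
  else if p0 = "pbpstats" then
    (if parts.length > 2 then PySem.Str.join "/" (PySem.List.slice parts none (some 2)) else "pbpstats")
  else if p0 = "tests" then
    (if parts.length > 2 then PySem.Str.join "/" (PySem.List.slice parts none (some 2)) else "tests")
  else if p0 = "scripts" then "scripts"
  else p0

def group_paths_for_index_py (paths : List String) : List (String × List String) :=
  let groups : PySem.Dict String (List String) :=
    paths.foldl (fun g path => g.modify (pvGroupKey path) [] (fun vs => vs ++ [path])) PySem.Dict.empty
  PySem.List.sorted2 (groups.items.map (fun kv => (kv.1, PySem.List.sorted kv.2 (fun v => v))))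
    (fun t => t.1) (fun t => t.2)

-- ===== PORT B =====
-- one step of Source B's scan; out is kept most-recent-group-first and reversed at the end
-- (Python appends new groups at the end and mutates out[-1])
def pvScanStep (out : List (String × List String)) (kp : String × String) : List (String × List String) :=
  match out with
  | (k, vs) :: rest => if k = kp.1 then (k, vs ++ [kp.2]) :: rest else (kp.1, [kp.2]) :: (k, vs) :: rest
  | [] => [(kp.1, [kp.2])]

def group_paths_for_index_py_alt (paths : List String) : List (String × List String) :=
  let pairs := PySem.List.sorted2 (paths.map (fun p => (pvGroupKey p, p))) (fun t => t.1) (fun t => t.2)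
  (pairs.foldl pvScanStep []).reverse

-- ===== PRECONDITION & SPEC =====
def Spec_group_paths_for_index_py (paths : List String) (out : List (String × List String)) : Prop := out = group_paths_for_index_py_alt paths
instance (paths : List String) (out : List (String × List String)) : Decidable (Spec_group_paths_for_index_py paths out) := by unfold Spec_group_paths_for_index_py; infer_instance

-- ===== CLAIM (what is proved, stated in full; the proofs are below) =====
def Claim_equal_group_paths_for_index_py : Prop := ∀ (paths : List String), Dom_group_paths_for_index_py paths → Spec_group_paths_for_index_py paths (group_paths_for_index_py paths)

-- ===== LEMMAS AND PROOFS =====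

theorem pvA_unfold (paths : List String) : group_paths_for_index_py paths
    = PySem.List.sorted2
        ((paths.foldl (fun g path => g.modify (pvGroupKey path) [] (fun vs => vs ++ [path]))
          (PySem.Dict.empty : PySem.Dict String (List String))).items.map
            (fun kv => (kv.1, PySem.List.sorted kv.2 (fun v => v))))
        (fun t => t.1) (fun t => t.2) := rfl

theorem pvB_unfold (paths : List String) : group_paths_for_index_py_alt paths
    = ((PySem.List.sorted2 (paths.map (fun p => (pvGroupKey p, p)))
        (fun t => t.1) (fun t => t.2)).foldl pvScanStep []).reverse := rfl

-- the comparator sorted2 uses (Python's lexicographic tuple comparison on (k1 x, k2 x))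
def pvcmp {α κ₁ κ₂ : Type} [LT κ₁] [DecidableLT κ₁] [LT κ₂] [DecidableLT κ₂]
    (k1 : α → κ₁) (k2 : α → κ₂) (a b : α) : Bool :=
  decide (k1 a < k1 b) || (!decide (k1 b < k1 a) && decide (k2 a < k2 b))

theorem pvsorted2_eq_foldl {α κ₁ κ₂ : Type} [LT κ₁] [DecidableLT κ₁] [LT κ₂] [DecidableLT κ₂]
    (xs : List α) (k1 : α → κ₁) (k2 : α → κ₂) :
    PySem.List.sorted2 xs k1 k2 = xs.foldl (fun acc x => PySem.List.insertBy (pvcmp k1 k2) x acc) [] := rfl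

theorem pvcmp_asymm {α κ₁ κ₂ : Type} [LT κ₁] [DecidableLT κ₁] [LT κ₂] [DecidableLT κ₂]
    (k1 : α → κ₁) (k2 : α → κ₂)
    (Hasym₁ : ∀ x y : κ₁, x < y → ¬ y < x) (Hasym₂ : ∀ x y : κ₂, x < y → ¬ y < x)
    (a b : α) (h : pvcmp k1 k2 a b = true) : pvcmp k1 k2 b a = false := by
  simp only [pvcmp, Bool.or_eq_true, Bool.and_eq_true, Bool.not_eq_true', decide_eq_true_iff,
    decide_eq_false_iff_not, Bool.or_eq_false_iff, Bool.and_eq_false_iff, Bool.not_eq_false'] at *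
  rcases h with h | ⟨h1, h2⟩
  · exact ⟨Hasym₁ _ _ h, Or.inl h⟩
  · exact ⟨h1, Or.inr (Hasym₂ _ _ h2)⟩

theorem pvcmp_negtrans {α κ₁ κ₂ : Type} [LT κ₁] [DecidableLT κ₁] [LT κ₂] [DecidableLT κ₂]
    (k1 : α → κ₁) (k2 : α → κ₂)
    (Htrans₁ : ∀ x y z : κ₁, x < y → y < z → x < z)
    (Htri₁ : ∀ x y : κ₁, x < y ∨ x = y ∨ y < x)
    (Htrans₂ : ∀ x y z : κ₂, x < y → y < z → x < z)
    (Htri₂ : ∀ x y : κ₂, x < y ∨ x = y ∨ y < x)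
    (a b c : α)
    (h1 : pvcmp k1 k2 b a = false) (h2 : pvcmp k1 k2 c b = false) : pvcmp k1 k2 c a = false := by
  simp only [pvcmp, Bool.or_eq_false_iff, Bool.and_eq_false_iff, Bool.not_eq_false',
    decide_eq_false_iff_not, decide_eq_true_iff] at *
  obtain ⟨hba, h1'⟩ := h1
  obtain ⟨hcb, h2'⟩ := h2
  constructor
  · intro hca
    rcases Htri₁ (k1 a) (k1 b) with hab | hab | hab
    · exact hcb (Htrans₁ _ _ _ hca hab)
    · exact hcb (hab ▸ hca)
    · exact hba hab
  · rcases h1' with h1' | h1'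
    · rcases Htri₁ (k1 a) (k1 c) with h | h | h
      · exact Or.inl h
      · exact absurd (show k1 c < k1 b by rw [← h]; exact h1') hcb
      · exact absurd (Htrans₁ _ _ _ h h1') hcb
    · rcases h2' with h2' | h2'
      · rcases Htri₁ (k1 a) (k1 c) with h | h | h
        · exact Or.inl h
        · exact absurd (show k1 b < k1 a by rw [h]; exact h2') hba
        · exact absurd (Htrans₁ _ _ _ h2' h) hba
      · refine Or.inr (fun hca => ?_)
        rcases Htri₂ (k2 a) (k2 b) with h | h | h
        · exact h2' (Htrans₂ _ _ _ hca h)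
        · exact h2' (h ▸ hca)
        · exact h1' h

theorem pvcmp_antisymm {κ₁ κ₂ : Type} [LT κ₁] [DecidableLT κ₁] [LT κ₂] [DecidableLT κ₂]
    (Htri₁ : ∀ x y : κ₁, x < y ∨ x = y ∨ y < x)
    (Htri₂ : ∀ x y : κ₂, x < y ∨ x = y ∨ y < x)
    (a b : κ₁ × κ₂)
    (h1 : pvcmp (fun t : κ₁ × κ₂ => t.1) (fun t => t.2) b a = false)
    (h2 : pvcmp (fun t : κ₁ × κ₂ => t.1) (fun t => t.2) a b = false) : a = b := by
  simp only [pvcmp, Bool.or_eq_false_iff, Bool.and_eq_false_iff, Bool.not_eq_false',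
    decide_eq_false_iff_not, decide_eq_true_iff] at *
  obtain ⟨hba, h1'⟩ := h1
  obtain ⟨hab, h2'⟩ := h2
  have e1 : a.1 = b.1 := by
    rcases Htri₁ a.1 b.1 with h | h | h
    · exact absurd h hab
    · exact h
    · exact absurd h hba
  have e2 : a.2 = b.2 := by
    rcases h1' with h | h
    · exact absurd h hab
    · rcases h2' with h' | h'
      · exact absurd h' hba
      · rcases Htri₂ a.2 b.2 with ht | ht | ht
        · exact absurd ht h'
        · exact ht
        · exact absurd ht h
  exact Prod.ext e1 e2

theorem pvcmp_false_of_fst_lt {κ₁ κ₂ : Type} [LT κ₁] [DecidableLT κ₁] [LT κ₂] [DecidableLT κ₂]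
    (Hasym₁ : ∀ x y : κ₁, x < y → ¬ y < x)
    (a b : κ₁ × κ₂) (h : a.1 < b.1) :
    pvcmp (fun t : κ₁ × κ₂ => t.1) (fun t => t.2) b a = false := by
  simp only [pvcmp, Bool.or_eq_false_iff, Bool.and_eq_false_iff, Bool.not_eq_false',
    decide_eq_false_iff_not, decide_eq_true_iff]
  exact ⟨Hasym₁ _ _ h, Or.inl h⟩

theorem pvpairwise_insertBy {α : Type} (lt : α → α → Bool)
    (hasym : ∀ a b, lt a b = true → lt b a = false)
    (htrans : ∀ a b c, lt b a = false → lt c b = false → lt c a = false)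
    (x : α) (ys : List α) (h : ys.Pairwise (fun a b => lt b a = false)) :
    (PySem.List.insertBy lt x ys).Pairwise (fun a b => lt b a = false) := by
  induction ys with
  | nil => simp [PySem.List.insertBy]
  | cons y ys ih =>
    rw [show PySem.List.insertBy lt x (y :: ys) =
        if lt x y then x :: y :: ys else y :: PySem.List.insertBy lt x ys by simp [PySem.List.insertBy]]
    rcases List.pairwise_cons.mp h with ⟨hy, hys⟩
    by_cases hxy : lt x y = true
    · simp only [hxy, if_true]
      refine List.pairwise_cons.mpr ⟨?_, h⟩
      intro z hz
      rcases List.mem_cons.mp hz with rfl | hz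
      · exact hasym _ _ hxy
      · exact htrans _ _ _ (hasym _ _ hxy) (hy z hz)
    · have hxy' : lt x y = false := Bool.eq_false_iff.mpr hxy
      rw [if_neg hxy]
      refine List.pairwise_cons.mpr ⟨?_, ih hys⟩
      intro z hz
      rcases (PySem.List.mem_insertBy lt x z ys).mp hz with rfl | hz
      · exact hxy'
      · exact hy z hz

theorem pvpairwise_foldl_insertBy {α : Type} (lt : α → α → Bool)
    (hasym : ∀ a b, lt a b = true → lt b a = false)
    (htrans : ∀ a b c, lt b a = false → lt c b = false → lt c a = false) :
    ∀ (xs : List α) (acc : List α), acc.Pairwise (fun a b => lt b a = false) →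
      (xs.foldl (fun acc x => PySem.List.insertBy lt x acc) acc).Pairwise (fun a b => lt b a = false) := by
  intro xs
  induction xs with
  | nil => intro acc h; simpa using h
  | cons x xs ih =>
    intro acc h
    exact ih _ (pvpairwise_insertBy lt hasym htrans x acc h)

theorem pvpairwise_sorted2 {α κ₁ κ₂ : Type} [LT κ₁] [DecidableLT κ₁] [LT κ₂] [DecidableLT κ₂]
    (xs : List α) (k1 : α → κ₁) (k2 : α → κ₂)
    (Hasym₁ : ∀ x y : κ₁, x < y → ¬ y < x) (Hasym₂ : ∀ x y : κ₂, x < y → ¬ y < x)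
    (Htrans₁ : ∀ x y z : κ₁, x < y → y < z → x < z)
    (Htri₁ : ∀ x y : κ₁, x < y ∨ x = y ∨ y < x)
    (Htrans₂ : ∀ x y z : κ₂, x < y → y < z → x < z)
    (Htri₂ : ∀ x y : κ₂, x < y ∨ x = y ∨ y < x) :
    (PySem.List.sorted2 xs k1 k2).Pairwise (fun a b => pvcmp k1 k2 b a = false) := by
  rw [pvsorted2_eq_foldl]
  exact pvpairwise_foldl_insertBy _ (pvcmp_asymm k1 k2 Hasym₁ Hasym₂)
    (pvcmp_negtrans k1 k2 Htrans₁ Htri₁ Htrans₂ Htri₂) xs [] (by simp)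

-- the canonical result both ports compute
def pvKeySet (paths : List String) : List String := PySem.Set.ofList (paths.map pvGroupKey)

def pvFilt (paths : List String) (k : String) : List String :=
  paths.filter (fun p => pvGroupKey p == k)

def pvC (paths : List String) : List (String × List String) :=
  (PySem.List.sorted (pvKeySet paths) (fun k => k)).map
    (fun k => (k, PySem.List.sorted (pvFilt paths k) (fun v => v)))

theorem pvC_pairwise_fst_lt (paths : List String) :
    (pvC paths).Pairwise (fun a b => a.1 < b.1) := by
  have h := PySem.List.sorted_ofList_pairwise_lt (paths.map pvGroupKey)
  unfold pvC pvKeySet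
  rw [List.pairwise_map]
  exact h

-- ===== A's port equals the canonical result =====
theorem pvA_eq_C (paths : List String) : group_paths_for_index_py paths = pvC paths := by
  have hfold : (paths.map (fun p => (pvGroupKey p, p))).foldl
        (fun d p => d.modify p.1 [] fun x => x ++ [p.2])
        (PySem.Dict.empty : PySem.Dict String (List String))
      = paths.foldl (fun g path => g.modify (pvGroupKey path) [] (fun vs => vs ++ [path]))
          PySem.Dict.empty := List.foldl_map
  have hkeys : (paths.foldl (fun g path => g.modify (pvGroupKey path) [] (fun vs => vs ++ [path]))
      (PySem.Dict.empty : PySem.Dict String (List String))).keys = pvKeySet paths :=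
    (PySem.Dict.keys_foldl_modify_key paths pvGroupKey ([] : List String)
      (fun _ x vs => vs ++ [x]) PySem.Dict.empty).trans rfl
  have hnodup : (paths.foldl (fun g path => g.modify (pvGroupKey path) [] (fun vs => vs ++ [path]))
      (PySem.Dict.empty : PySem.Dict String (List String))).keys.Nodup :=
    PySem.Dict.nodup_keys_foldl_modify_key paths pvGroupKey ([] : List String)
      (fun _ x vs => vs ++ [x]) PySem.Dict.empty PySem.Dict.nodup_keys_empty
  have hget : ∀ k, (paths.foldl (fun g path => g.modify (pvGroupKey path) [] (fun vs => vs ++ [path]))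
      (PySem.Dict.empty : PySem.Dict String (List String))).getD k [] = pvFilt paths k := by
    intro k
    rw [← hfold, PySem.Dict.getD_foldl_modify_append]
    simp [PySem.Dict.getD_empty, List.filter_map, List.map_map, Function.comp_def, pvFilt]
  have hitems : (paths.foldl (fun g path => g.modify (pvGroupKey path) [] (fun vs => vs ++ [path]))
        (PySem.Dict.empty : PySem.Dict String (List String))).items
      = (pvKeySet paths).map (fun k => (k, pvFilt paths k)) := by
    rw [PySem.Dict.items_eq_map_keys _ hnodup ([] : List String), hkeys]
    exact List.map_congr_left (fun k _ => by rw [hget k])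
  rw [pvA_unfold, hitems, List.map_map]
  rw [show ((fun kv : String × List String => (kv.1, PySem.List.sorted kv.2 (fun v => v)))
      ∘ fun k => (k, pvFilt paths k))
      = fun k => (k, PySem.List.sorted (pvFilt paths k) (fun v => v)) from rfl]
  refine List.Perm.eq_of_pairwise (le := fun a b =>
      pvcmp (fun t : String × List String => t.1) (fun t => t.2) b a = false)
    (fun a b _ _ hx hy => pvcmp_antisymm (fun x y => lt_trichotomy x y)
      (fun x y => lt_trichotomy x y) a b hx hy)
    (pvpairwise_sorted2 _ _ _ (fun _ _ h => lt_asymm h) (fun _ _ h => lt_asymm h)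
      (fun _ _ _ h h' => lt_trans h h') (fun x y => lt_trichotomy x y)
      (fun _ _ _ h h' => lt_trans h h') (fun x y => lt_trichotomy x y))
    ((pvC_pairwise_fst_lt paths).imp
      (fun h => pvcmp_false_of_fst_lt (fun _ _ h => lt_asymm h) _ _ h)) ?_
  exact (PySem.List.sorted2_perm _ _ _ false).trans
    (((PySem.List.sorted_perm (pvKeySet paths) (fun k => k) false).map _).symm)

-- ===== B's port equals the canonical result =====

-- the sorted pairs list, written as blocks: for each group key in sorted order,
-- its sorted values tagged with the key
def pvP (paths : List String) : List (String × String) :=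
  (PySem.List.sorted (pvKeySet paths) (fun k => k)).flatMap
    (fun k => (PySem.List.sorted (pvFilt paths k) (fun v => v)).map (fun p => (k, p)))

theorem pvPartition {α : Type} (key : α → String) :
    ∀ (K : List String) (l : List α), K.Nodup → (∀ x ∈ l, key x ∈ K) →
      (K.flatMap (fun k => l.filter (fun x => key x == k))).Perm l := by
  intro K
  induction K with
  | nil =>
    intro l _ hl
    cases l with
    | nil => simp
    | cons x xs => exact absurd (hl x (by simp)) (by simp)
  | cons k K ih =>
    intro l hnd hl
    rw [List.flatMap_cons]
    have hblocks : ∀ k' ∈ K, l.filter (fun x => key x == k')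
        = (l.filter (fun x => !(key x == k))).filter (fun x => key x == k') := by
      intro k' hk'
      rw [List.filter_filter]
      refine (List.filter_congr ?_).symm
      intro x _
      by_cases hx : key x = k'
      · have hne : k' ≠ k := fun h => (List.nodup_cons.mp hnd).1 (h ▸ hk')
        simp [hx, hne]
      · simp [hx]
    rw [List.flatMap_congr hblocks]
    have hsub : ∀ x ∈ l.filter (fun x => !(key x == k)), key x ∈ K := by
      intro x hx
      rcases List.mem_filter.mp hx with ⟨hxl, hxk⟩
      rcases List.mem_cons.mp (hl x hxl) with h | h
      · have hne : key x ≠ k := by simpa using hxk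
        exact absurd h hne
      · exact h
    refine (List.Perm.append_left _ (ih _ (List.nodup_cons.mp hnd).2 hsub)).trans ?_
    exact List.filter_append_perm _ l

theorem pvpairs_eq_P (paths : List String) :
    PySem.List.sorted2 (paths.map (fun p => (pvGroupKey p, p))) (fun t => t.1) (fun t => t.2)
      = pvP paths := by
  have hperm : (pvP paths).Perm (paths.map (fun p => (pvGroupKey p, p))) := by
    unfold pvP
    have hstep1 : ((PySem.List.sorted (pvKeySet paths) (fun k => k)).flatMap
          (fun k => (PySem.List.sorted (pvFilt paths k) (fun v => v)).map (fun p => (k, p)))).Perm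
        ((pvKeySet paths).flatMap (fun k => (pvFilt paths k).map (fun p => (k, p)))) := by
      refine List.Perm.flatMap (PySem.List.sorted_perm _ _ false) ?_
      intro k _
      exact (PySem.List.sorted_perm (pvFilt paths k) (fun v => v) false).map _
    refine hstep1.trans ?_
    have hblock : ∀ k ∈ pvKeySet paths, (pvFilt paths k).map (fun p => (k, p))
        = (paths.map (fun p => (pvGroupKey p, p))).filter (fun q => q.1 == k) := by
      intro k _
      rw [List.filter_map]
      rw [show ((fun (q : String × String) => q.1 == k) ∘ fun p => (pvGroupKey p, p))
          = fun p => pvGroupKey p == k from rfl]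
      refine (List.map_congr_left ?_).symm
      intro p hp
      have hpk : p ∈ paths.filter (fun p => pvGroupKey p == k) := by simpa [pvFilt] using hp
      have hk : pvGroupKey p = k := by simpa using (List.mem_filter.mp hpk).2
      show (pvGroupKey p, p) = (k, p)
      rw [hk]
    rw [List.flatMap_congr hblock]
    refine pvPartition (fun q : String × String => q.1) (pvKeySet paths)
      (paths.map (fun p => (pvGroupKey p, p))) (PySem.Set.nodup_ofList _) ?_
    intro x hx
    rcases List.mem_map.mp hx with ⟨p, hp, rfl⟩
    exact (PySem.Set.mem_ofList _ _).mpr (List.mem_map.mpr ⟨p, hp, rfl⟩)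
  refine List.Perm.eq_of_pairwise (le := fun a b =>
      pvcmp (fun t : String × String => t.1) (fun t => t.2) b a = false)
    (fun a b _ _ hx hy => pvcmp_antisymm (fun x y => lt_trichotomy x y)
      (fun x y => lt_trichotomy x y) a b hx hy)
    (pvpairwise_sorted2 _ _ _ (fun _ _ h => lt_asymm h) (fun _ _ h => lt_asymm h)
      (fun _ _ _ h h' => lt_trans h h') (fun x y => lt_trichotomy x y)
      (fun _ _ _ h h' => lt_trans h h') (fun x y => lt_trichotomy x y)) ?_
    ((PySem.List.sorted2_perm _ _ _ false).trans hperm.symm)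
  -- pvP is sorted: within a block snd is nondecreasing, across blocks fst is increasing
  unfold pvP
  rw [List.pairwise_flatMap]
  constructor
  · intro k _
    rw [List.pairwise_map]
    refine (PySem.List.sorted_pairwise (pvFilt paths k) (fun v => v)).imp ?_
    intro a b hab
    simp only [pvcmp, Bool.or_eq_false_iff, Bool.and_eq_false_iff, Bool.not_eq_false',
      decide_eq_false_iff_not, decide_eq_true_iff]
    exact ⟨lt_irrefl k, Or.inr (not_lt.mpr hab)⟩
  · refine (PySem.List.sorted_ofList_pairwise_lt (paths.map pvGroupKey)).imp ?_
    intro k k' hkk' x hx y hy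
    rcases List.mem_map.mp hx with ⟨a2, _, rfl⟩
    rcases List.mem_map.mp hy with ⟨b2, _, rfl⟩
    exact pvcmp_false_of_fst_lt (fun _ _ h => lt_asymm h) _ _ hkk'

theorem pvScanRun (k : String) (acc : List (String × List String)) :
    ∀ (vs : List String) (u : List String),
      (vs.map (fun p => (k, p))).foldl pvScanStep ((k, u) :: acc) = (k, u ++ vs) :: acc := by
  intro vs
  induction vs with
  | nil => intro u; simp
  | cons v vs ih =>
    intro u
    rw [List.map_cons, List.foldl_cons]
    have hstep : pvScanStep ((k, u) :: acc) (k, v) = (k, u ++ [v]) :: acc := by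
      simp [pvScanStep]
    rw [hstep, ih (u ++ [v])]
    simp

theorem pvScanBlock (k : String) (v : String) (vs : List String)
    (acc : List (String × List String)) (h : ∀ pr, acc.head? = some pr → pr.1 ≠ k) :
    ((v :: vs).map (fun p => (k, p))).foldl pvScanStep acc = (k, v :: vs) :: acc := by
  have hstep : pvScanStep acc (k, v) = (k, [v]) :: acc := by
    cases acc with
    | nil => rfl
    | cons pr rest =>
      obtain ⟨k0, vs0⟩ := pr
      have hne : k0 ≠ k := h (k0, vs0) rfl
      simp [pvScanStep, hne]
  rw [List.map_cons, List.foldl_cons, hstep, pvScanRun]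
  simp

theorem pvScanBlocks (g : String → List String) :
    ∀ (ks : List String) (acc : List (String × List String)),
      ks.Pairwise (· ≠ ·) → (∀ k ∈ ks, g k ≠ []) →
      (∀ k ∈ ks, ∀ pr, acc.head? = some pr → pr.1 ≠ k) →
      (ks.flatMap (fun k => (g k).map (fun p => (k, p)))).foldl pvScanStep acc
        = (ks.map (fun k => (k, g k))).reverse ++ acc := by
  intro ks
  induction ks with
  | nil => intro acc _ _ _; simp
  | cons k ks ih =>
    intro acc hnd hne hhead
    rw [List.flatMap_cons, List.foldl_append]
    obtain ⟨v, vs, hgk⟩ : ∃ v vs, g k = v :: vs := by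
      cases hgk : g k with
      | nil => exact absurd hgk (hne k (by simp))
      | cons v vs => exact ⟨v, vs, rfl⟩
    rw [hgk, pvScanBlock k v vs acc (hhead k (by simp))]
    rw [ih ((k, v :: vs) :: acc) (List.pairwise_cons.mp hnd).2
      (fun k' hk' => hne k' (List.mem_cons_of_mem _ hk'))
      (fun k' hk' pr hpr => by
        rw [List.head?_cons, Option.some.injEq] at hpr
        subst hpr
        exact fun hkk => ((List.pairwise_cons.mp hnd).1 k' hk') hkk)]
    simp [hgk]

theorem pvB_eq_C (paths : List String) : group_paths_for_index_py_alt paths = pvC paths := by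
  rw [pvB_unfold, pvpairs_eq_P]
  unfold pvP
  rw [pvScanBlocks (fun k => PySem.List.sorted (pvFilt paths k) (fun v => v))
    (PySem.List.sorted (pvKeySet paths) (fun k => k)) []
    ((PySem.List.sorted_ofList_pairwise_lt (paths.map pvGroupKey)).imp (fun h => ne_of_lt h))
    ?ne (by intro _ _ _ h; cases h)]
  · rw [List.append_nil, List.reverse_reverse]
    rfl
  case ne =>
    intro k hk
    rw [PySem.List.mem_sorted] at hk
    rcases List.mem_map.mp ((PySem.Set.mem_ofList _ _).mp hk) with ⟨p, hp, rfl⟩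
    rw [Ne, PySem.List.sorted_eq_nil_iff]
    intro hfilt
    have hmem : p ∈ pvFilt paths (pvGroupKey p) := by
      unfold pvFilt
      exact List.mem_filter.mpr ⟨hp, by simp⟩
    rw [hfilt] at hmem
    exact absurd hmem (List.not_mem_nil)

-- ===== VERDICT (by name: the statement is the Claim_ definition above) =====
theorem group_paths_for_index_py_spec : Claim_equal_group_paths_for_index_py := by
  intro paths _
  unfold Spec_group_paths_for_index_py
  rw [pvA_eq_C, pvB_eq_C]
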